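-- pv_equiv track=rewrite | github.com/PresleyHe/Unit-3-Functions | Lesson2-Collections-Essentials/Part2-Strings/homework.py | count_character_types
-- ===== SOURCE A (Python) =====
-- def count_character_types(text):
--     letters = 0
--     digits = 0
--     spaces = 0
--     for char in text:
--         if char.isalpha():
--             letters += 1
--         elif char.isdigit():
--             digits += 1
--         elif char == " ":
--             spaces += 1
--     return {"letters": letters, "digits": digits, "spaces": spaces}
-- ===== SOURCE B (Python) =====
-- def count_character_types(text):
--     counts = {}
--     for char in text:
--         counts[char] = counts.get(char, 0) + 1
--     letters = sum(n for char, n in counts.items() if char.isalpha())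
--     digits = sum(n for char, n in counts.items() if char.isdigit())
--     spaces = counts.get(" ", 0)
--     return {"letters": letters, "digits": digits, "spaces": spaces}
-- ===== Notes on version B (the rewrite author's own statement) =====
-- stated objective: alternative
-- what changed: B builds a per-character count dictionary in one pass and then derives letters/digits by summing over the distinct (char, count) items and spaces by a single dictionary lookup of the space character, instead of A's fused if/elif chain with three running counters over every character.
import Mathlib
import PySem

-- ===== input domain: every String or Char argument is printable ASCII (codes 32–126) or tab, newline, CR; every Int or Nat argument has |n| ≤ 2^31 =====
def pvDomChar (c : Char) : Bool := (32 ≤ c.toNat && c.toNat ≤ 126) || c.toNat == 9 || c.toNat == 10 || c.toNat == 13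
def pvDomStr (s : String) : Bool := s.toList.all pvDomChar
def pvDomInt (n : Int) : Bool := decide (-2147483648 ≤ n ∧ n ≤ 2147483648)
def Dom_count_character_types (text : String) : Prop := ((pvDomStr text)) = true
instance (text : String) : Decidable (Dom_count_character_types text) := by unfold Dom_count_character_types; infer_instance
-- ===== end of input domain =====

-- B replaces A's fused if/elif loop with three counters by a one-pass character-count
-- dictionary plus per-class sums over its distinct (char, count) items (objective: alternative).

-- ===== PORT A =====
def count_character_types (text : String) : List (String × Int) :=
  let r := text.toList.foldl (fun (s : Int × Int × Int) char =>
      if PySem.Chars.isalpha char then (s.1 + 1, s.2.1, s.2.2)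
      else if PySem.Chars.isdigit char then (s.1, s.2.1 + 1, s.2.2)
      else if char == ' ' then (s.1, s.2.1, s.2.2 + 1)
      else s) ((0 : Int), (0 : Int), (0 : Int))
  [("letters", r.1), ("digits", r.2.1), ("spaces", r.2.2)]

-- ===== PORT B =====
def count_character_types_alt (text : String) : List (String × Int) :=
  let counts : PySem.Dict Char Int :=
    text.toList.foldl (fun d char => d.insert char (d.getD char 0 + 1)) PySem.Dict.empty
  let letters : Int :=
    counts.items.foldl (fun a p => if PySem.Chars.isalpha p.1 then a + p.2 else a) 0
  let digits : Int :=
    counts.items.foldl (fun a p => if PySem.Chars.isdigit p.1 then a + p.2 else a) 0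
  let spaces : Int := counts.getD ' ' 0
  [("letters", letters), ("digits", digits), ("spaces", spaces)]

-- ===== PRECONDITION & SPEC =====
def Spec_count_character_types (text : String) (out : List (String × Int)) : Prop := out = count_character_types_alt text
instance (text : String) (out : List (String × Int)) : Decidable (Spec_count_character_types text out) := by unfold Spec_count_character_types; infer_instance

-- ===== CLAIM (what is proved, stated in full; the proofs are below) =====
def Claim_equal_count_character_types : Prop := ∀ (text : String), Dom_count_character_types text → Spec_count_character_types text (count_character_types text)

-- ===== LEMMAS AND PROOFS =====

theorem alpha_not_digit (c : Char) (h : PySem.Chars.isalpha c = true) :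
    PySem.Chars.isdigit c = false := by
  simp [PySem.Chars.isalpha, PySem.Chars.isdigit, PySem.Chars.isupper, PySem.Chars.islower,
    Char.le_def, UInt32.le_iff_toNat_le] at *
  omega

theorem alpha_not_space (c : Char) (h : PySem.Chars.isalpha c = true) : (c == ' ') = false := by
  simp [PySem.Chars.isalpha, PySem.Chars.isupper, PySem.Chars.islower, Char.le_def] at *
  rintro rfl; simp at h

theorem digit_not_space (c : Char) (h : PySem.Chars.isdigit c = true) : (c == ' ') = false := by
  simp [PySem.Chars.isdigit, Char.le_def] at *
  rintro rfl; simp at h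

theorem A_fold (cs : List Char) : ∀ l d s : Int,
    cs.foldl (fun (s : Int × Int × Int) char =>
      if PySem.Chars.isalpha char then (s.1 + 1, s.2.1, s.2.2)
      else if PySem.Chars.isdigit char then (s.1, s.2.1 + 1, s.2.2)
      else if char == ' ' then (s.1, s.2.1, s.2.2 + 1)
      else s) (l, d, s)
    = (l + cs.countP PySem.Chars.isalpha, d + cs.countP PySem.Chars.isdigit,
       s + (cs.count ' ' : Int)) := by
  induction cs with
  | nil => intro l d s; simp
  | cons c cs ih =>
    intro l d s
    simp only [List.foldl_cons, List.countP_cons, List.count_cons]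
    by_cases ha : PySem.Chars.isalpha c = true
    · have hd := alpha_not_digit c ha
      have hs := alpha_not_space c ha
      simp only [ha, hd, hs, if_true, ih]
      refine Prod.ext ?_ (Prod.ext ?_ ?_) <;> simp <;> push_cast <;> ring
    · by_cases hd : PySem.Chars.isdigit c = true
      · have hs := digit_not_space c hd
        simp only [ha, hd, hs, if_true, ih]
        refine Prod.ext ?_ (Prod.ext ?_ ?_) <;> simp <;> push_cast <;> ring
      · by_cases hs : (c == ' ') = true
        · simp only [ha, hd, hs, if_true, ih]
          refine Prod.ext ?_ (Prod.ext ?_ ?_) <;> simp <;> push_cast <;> ring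
        · simp only [ha, hd, hs, ih]
          refine Prod.ext ?_ (Prod.ext ?_ ?_) <;> simp

theorem sum_ite_count (p : Char → Bool) (cs : List Char) :
    ((PySem.Set.ofList cs).map (fun k => if p k then (cs.count k : Int) else 0)).sum
      = (cs.countP p : Int) := by
  classical
  have hnd : (PySem.Set.ofList cs).Nodup := PySem.Set.nodup_ofList cs
  have hfs : (PySem.Set.ofList cs).toFinset = cs.toFinset := by
    ext a; simp [PySem.Set.mem_ofList]
  rw [← List.sum_toFinset _ hnd, hfs]
  have : (cs.countP p : Int) = ((∑ a ∈ cs.toFinset, if p a then cs.count a else 0 : ℕ) : Int) := by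
    congr 1
    rw [List.countP_eq_length_filter]
    rw [← List.sum_toFinset_count_eq_length (cs.filter p)]
    rw [List.toFinset_filter]
    rw [Finset.sum_filter]
    exact Finset.sum_congr rfl (fun a _ => by by_cases hp : p a = true <;> simp [List.count_filter, hp])
  rw [this]
  push_cast
  rfl

theorem B_class_sum (p : Char → Bool) (cs : List Char) :
    ((cs.foldl (fun d char => d.insert char (d.getD char 0 + 1)) PySem.Dict.empty).items.foldl
      (fun a q => if p q.1 then a + q.2 else a) 0) = (cs.countP p : Int) := by
  rw [PySem.Dict.foldl_insert_getD_add_one_eq_counter, PySem.Dict.items_counter, List.foldl_map]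
  refine (PySem.List.foldl_congr_mem _ _
    (fun (a : Int) (k : Char) => a + (if p k then (cs.count k : Int) else 0)) _ ?_).trans ?_
  · intro a k _
    by_cases hp : p k = true <;> simp [hp]
  · rw [PySem.List.foldl_add, sum_ite_count p cs]
    ring

-- ===== VERDICT (by name: the statement is the Claim_ definition above) =====
theorem count_character_types_spec : Claim_equal_count_character_types := by
  intro text _
  unfold Spec_count_character_types count_character_types count_character_types_alt
  simp only [A_fold, B_class_sum]
  rw [PySem.Dict.foldl_insert_getD_add_one_eq_counter, PySem.Dict.getD_counter]
  norm_num
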